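-- pv_equiv track=rewrite | github.com/makskliczkowski/general_python | ml/net_impl/networks/net_approx_symmetric.py | _canonical_cycle
-- ===== SOURCE A (Python) =====
-- from    typing import Any, Callable, Dict, List, Optional, Sequence, Tuple
--
-- def _canonical_cycle(cycle: Sequence[int]) -> Tuple[int, ...]:
--     """
--     Canonical representation of a cycle under rotation and reversal.
--     """
--     cyc = [int(x) for x in cycle]
--     n = len(cyc)
--     if n == 0:
--         return tuple()
--
--     variants = []
--     for seq in (cyc, list(reversed(cyc))):
--         for shift in range(n):
--             variants.append(tuple(seq[shift:] + seq[:shift]))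
--     return min(variants)
-- ===== SOURCE B (Python) =====
-- def _least_rotation(seq):
--     # Champion scan: keep the index of the best rotation seen so far and
--     # compare each candidate rotation against it at the first differing position.
--     n = len(seq)
--     d = seq + seq
--     best = 0
--     for i in range(1, n):
--         for k in range(n):
--             if d[i + k] != d[best + k]:
--                 if d[i + k] < d[best + k]:
--                     best = i
--                 break
--     return tuple(d[best:best + n])
--
--
-- def _canonical_cycle(cycle):
--     cyc = [int(x) for x in cycle]
--     if not cyc:
--         return tuple()
--     return min(_least_rotation(cyc), _least_rotation(cyc[::-1]))
-- ===== Notes on version B (the rewrite author's own statement) =====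
-- stated objective: alternative
-- what changed: A materializes all 2n rotation/reversal variants as tuples and takes min of the list; B never builds a variant list: it finds the least rotation of the forward and of the reversed sequence by a champion scan on the doubled sequence (compare each candidate start index against the current best at the first differing position, with early break) and returns the smaller of the two.
import Mathlib
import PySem

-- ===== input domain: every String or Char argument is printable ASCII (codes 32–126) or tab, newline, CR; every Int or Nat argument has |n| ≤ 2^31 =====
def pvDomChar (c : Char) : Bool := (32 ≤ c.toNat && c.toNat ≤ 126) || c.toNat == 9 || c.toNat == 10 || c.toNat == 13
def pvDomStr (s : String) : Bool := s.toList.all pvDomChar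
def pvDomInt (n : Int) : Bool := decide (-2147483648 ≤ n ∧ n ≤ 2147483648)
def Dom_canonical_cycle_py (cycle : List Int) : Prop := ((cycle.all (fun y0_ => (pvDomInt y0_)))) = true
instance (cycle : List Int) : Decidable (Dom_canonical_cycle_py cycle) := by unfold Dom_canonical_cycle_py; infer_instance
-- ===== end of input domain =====

-- B replaces A's "materialize all 2n rotations and reversals, then min" by a champion scan on the
-- doubled list (least rotation of the forward and of the reversed sequence via first-differing-position
-- comparison, then the smaller of the two); no list of variants is built (objective: alternative).


-- ===== PORT A =====
def canonical_cycle_py (cycle : List Int) : List Int :=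
  let cyc := cycle.map (fun x => x)          -- [int(x) for x in cycle]
  let n : Int := PySem.List.len cyc
  if n = 0 then []
  else
    let variants := [cyc, cyc.reverse].foldl (fun acc seq =>
      (PySem.List.pyRange 0 n 1).foldl (fun acc shift =>
        acc ++ [PySem.List.slice seq (some shift) none ++ PySem.List.slice seq none (some shift)]) acc) []
    (PySem.List.min? variants (fun v => v)).getD []   -- min(variants); variants is nonempty here

-- ===== PORT B =====
-- the inner 'for k in range(n): if d[i+k] != d[best+k]: …; break' loop of Source B
def pvScan (d : List Int) (i best : Int) : List Int → Int
  | [] => best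
  | k :: ks =>
    if PySem.List.pyGetD d (i + k) 0 ≠ PySem.List.pyGetD d (best + k) 0 then
      if PySem.List.pyGetD d (i + k) 0 < PySem.List.pyGetD d (best + k) 0 then i else best
    else pvScan d i best ks

def pvLeastRotation (seq : List Int) : List Int :=
  let n : Int := PySem.List.len seq
  let d := seq ++ seq
  let best := (PySem.List.pyRange 1 n 1).foldl
    (fun best i => pvScan d i best (PySem.List.pyRange 0 n 1)) 0
  PySem.List.slice d (some best) (some (best + n))

def canonical_cycle_py_alt (cycle : List Int) : List Int :=
  let cyc := cycle.map (fun x => x)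
  if cyc = [] then []
  else min (pvLeastRotation cyc) (pvLeastRotation cyc.reverse)

-- ===== PRECONDITION & SPEC =====
def Spec_canonical_cycle_py (cycle : List Int) (out : List Int) : Prop := out = canonical_cycle_py_alt cycle
instance (cycle : List Int) (out : List Int) : Decidable (Spec_canonical_cycle_py cycle out) := by unfold Spec_canonical_cycle_py; infer_instance

-- ===== CLAIM (what is proved, stated in full; the proofs are below) =====
def Claim_equal_canonical_cycle_py : Prop := ∀ (cycle : List Int), Dom_canonical_cycle_py cycle → Spec_canonical_cycle_py cycle (canonical_cycle_py cycle)

-- ===== LEMMAS AND PROOFS =====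

def pvRot (s : List Int) (i : Nat) : List Int := s.drop i ++ s.take i

theorem pvRot_eq_window (s : List Int) (i : Nat) (hi : i ≤ s.length) :
    pvRot s i = ((s ++ s).drop i).take s.length := by
  unfold pvRot
  rw [List.drop_append_of_le_length hi, List.take_append]
  congr 2
  · simp
  · simp; omega

theorem pvRot_length (s : List Int) (i : Nat) : (pvRot s i).length = s.length := by
  simp [pvRot]; omega

theorem pvRot_zero (s : List Int) : pvRot s 0 = s := by simp [pvRot]

def pvCmp (ri rb : Int) : List Int → List Int → Int
  | x :: u, y :: v => if x = y then pvCmp ri rb u v else if x < y then ri else rb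
  | _, _ => rb

theorem pvCmp_eq (ri rb : Int) (u v : List Int) (h : u.length = v.length) :
    pvCmp ri rb u v = if u < v then ri else rb := by
  induction u generalizing v with
  | nil =>
    cases v with
    | nil => simp [pvCmp]
    | cons y v => simp at h
  | cons x u ih =>
    cases v with
    | nil => simp at h
    | cons y v =>
      simp only [List.length_cons, Nat.add_right_cancel_iff] at h
      by_cases hxy : x = y
      · subst hxy
        simp only [pvCmp, ih v h, List.cons_lt_cons_iff]
        by_cases huv : u < v
        · simp [huv]
        · simp [huv]
      · by_cases hlt : x < y
        · simp [pvCmp, hxy, hlt, List.cons_lt_cons_iff]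
        · have : ¬ (x :: u) < (y :: v) := by
            simp [List.cons_lt_cons_iff, hlt, hxy]
          simp [pvCmp, hxy, hlt, this]

theorem pvScan_eq_pvCmp (d : List Int) (i b : Int) (ks u v : List Int)
    (hu : u.length = ks.length) (hv : v.length = ks.length)
    (hki : ∀ (m : Nat) (h : m < ks.length),
      PySem.List.pyGetD d (i + ks[m]) 0 = u[m]'(by omega))
    (hkb : ∀ (m : Nat) (h : m < ks.length),
      PySem.List.pyGetD d (b + ks[m]) 0 = v[m]'(by omega)) :
    pvScan d i b ks = pvCmp i b u v := by
  induction ks generalizing u v with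
  | nil =>
    have : u = [] := List.length_eq_zero_iff.mp hu
    have : v = [] := List.length_eq_zero_iff.mp hv
    subst_vars; rfl
  | cons k ks ih =>
    cases u with
    | nil => simp at hu
    | cons x u =>
      cases v with
      | nil => simp at hv
      | cons y v =>
        have h0i := hki 0 (by simp)
        have h0b := hkb 0 (by simp)
        simp only [List.getElem_cons_zero] at h0i h0b
        simp only [List.length_cons, Nat.add_right_cancel_iff] at hu hv
        have hx : PySem.List.pyGetD d (i + k) 0 = x := by simpa using h0i
        have hy : PySem.List.pyGetD d (b + k) 0 = y := by simpa using h0b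
        simp only [pvScan, pvCmp, hx, hy]
        by_cases hxy : x = y
        · simp only [hxy, ne_eq, not_true_eq_false, if_false]
          exact ih u v hu hv
            (fun m hm => by simpa using hki (m + 1) (by simpa using hm))
            (fun m hm => by simpa using hkb (m + 1) (by simpa using hm))
        · simp [hxy]

theorem pv_window_get (s : List Int) (j m : Nat) (hj : j < s.length) (hm : m < s.length) :
    PySem.List.pyGetD (s ++ s) ((j : Int) + (m : Int)) 0 = (pvRot s j).getD m 0 := by
  have h1 : ((j:Int) + (m:Int)) = ((j + m : Nat) : Int) := by push_cast; ring
  rw [h1, PySem.List.pyGetD_natCast]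
  rw [List.getD_eq_getElem _ _ (by simp; omega),
      List.getD_eq_getElem _ _ (by rw [pvRot_length]; omega)]
  simp [pvRot_eq_window s j (le_of_lt hj), List.getElem_take, List.getElem_drop]

theorem pvScan_spec (s : List Int) (i b : Nat) (hi : i < s.length) (hb : b < s.length) :
    pvScan (s ++ s) (i : Int) (b : Int) (PySem.List.pyRange 0 (s.length : Int) 1) =
      if pvRot s i < pvRot s b then (i : Int) else (b : Int) := by
  rw [PySem.List.pyRange_zero_natCast s.length]
  have hcmp := pvCmp_eq (i:Int) (b:Int) (pvRot s i) (pvRot s b)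
    (by rw [pvRot_length, pvRot_length])
  rw [pvScan_eq_pvCmp (s ++ s) i b _ (pvRot s i) (pvRot s b)
    (by simp [pvRot_length]) (by simp [pvRot_length])
    (fun m hm => by
      simp only [List.getElem_map, List.getElem_range]
      rw [pv_window_get s i m hi (by simpa using hm)]
      exact List.getD_eq_getElem _ _ (by rw [pvRot_length]; simpa using hm))
    (fun m hm => by
      simp only [List.getElem_map, List.getElem_range]
      rw [pv_window_get s b m hb (by simpa using hm)]
      exact List.getD_eq_getElem _ _ (by rw [pvRot_length]; simpa using hm))]
  exact hcmp

theorem pv_champ (s : List Int) (L : List Nat) (hL : ∀ j ∈ L, j < s.length)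
    (b0 : Nat) (hb0 : b0 < s.length) :
    ∃ b : Nat, b < s.length ∧
      (L.map (Nat.cast : Nat → Int)).foldl
        (fun best i => pvScan (s ++ s) i best (PySem.List.pyRange 0 (s.length : Int) 1)) ↑b0 = ↑b ∧
      pvRot s b = (L.map (pvRot s)).foldl min (pvRot s b0) := by
  induction L generalizing b0 with
  | nil => exact ⟨b0, hb0, rfl, rfl⟩
  | cons j L ih =>
    have hj : j < s.length := hL j (by simp)
    simp only [List.map_cons, List.foldl_cons]
    rw [pvScan_spec s j b0 hj hb0]
    by_cases h : pvRot s j < pvRot s b0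
    · rw [if_pos h]
      obtain ⟨b, hb, he, hm⟩ := ih (fun x hx => hL x (by simp [hx])) j hj
      exact ⟨b, hb, he, by rw [hm, min_eq_right (le_of_lt h)]⟩
    · rw [if_neg h]
      obtain ⟨b, hb, he, hm⟩ := ih (fun x hx => hL x (by simp [hx])) b0 hb0
      exact ⟨b, hb, he, by rw [hm, min_eq_left (not_lt.mp h)]⟩

theorem pv_pyRange_one (n : Nat) :
    PySem.List.pyRange 1 (n : Int) 1 =
      ((List.range (n - 1)).map (fun k => k + 1)).map (Nat.cast : Nat → Int) := by
  rw [PySem.List.pyRange_of_pos 1 (n : Int) Int.one_pos]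
  by_cases hn : 1 < (n : Int)
  · rw [if_pos hn]
    have h1 : (((n : Int) - 1 + 1 - 1) / 1).toNat = n - 1 := by
      simp
    rw [h1, List.map_map]
    apply List.map_congr_left
    intro k _
    simp only [Function.comp_apply]
    push_cast
    ring
  · rw [if_neg hn]
    have : n - 1 = 0 := by omega
    simp [this]

theorem pvLeastRotation_eq (s : List Int) (hs : s ≠ []) :
    pvLeastRotation s =
      (((List.range (s.length - 1)).map (fun k => k + 1)).map (pvRot s)).foldl min (pvRot s 0) := by
  have hpos : 0 < s.length := List.length_pos_iff.mpr hs
  unfold pvLeastRotation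
  simp only [PySem.List.len_eq]
  rw [pv_pyRange_one s.length]
  obtain ⟨b, hb, he, hm⟩ := pv_champ s ((List.range (s.length - 1)).map (fun k => k + 1))
    (by intro j hj; simp at hj; omega) 0 hpos
  simp only [Nat.cast_zero] at he
  rw [he, ← hm]
  have h2 : (b : Int) + (s.length : Int) = ((b + s.length : Nat) : Int) := by push_cast; ring
  rw [h2]
  simp only [Nat.cast_nonneg, PySem.List.slice_toNat, Int.toNat_natCast]
  rw [pvRot_eq_window s b (le_of_lt hb)]
  congr 1
  omega

theorem pv_foldl_min_assoc (t : List (List Int)) : ∀ a x : List Int,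
    t.foldl min (min a x) = min a (t.foldl min x) := by
  induction t with
  | nil => intro a x; rfl
  | cons y t ih => intro a x; simp only [List.foldl_cons]; rw [min_assoc, ih]

theorem pv_foldl_min_cons (a x : List Int) (t : List (List Int)) :
    (x :: t).foldl min a = min a (t.foldl min x) := by
  simp only [List.foldl_cons]; exact pv_foldl_min_assoc t a x

theorem pvVariants_eq (cyc : List Int) :
    [cyc, cyc.reverse].foldl (fun acc seq =>
      (PySem.List.pyRange 0 (PySem.List.len cyc) 1).foldl (fun acc shift =>
        acc ++ [PySem.List.slice seq (some shift) none ++ PySem.List.slice seq none (some shift)]) acc) []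
    = (List.range cyc.length).map (pvRot cyc) ++ (List.range cyc.length).map (pvRot cyc.reverse) := by
  have key : ∀ (seq : List Int) (acc : List (List Int)),
      (PySem.List.pyRange 0 (PySem.List.len cyc) 1).foldl (fun acc shift =>
        acc ++ [PySem.List.slice seq (some shift) none ++ PySem.List.slice seq none (some shift)]) acc
      = acc ++ (List.range cyc.length).map (pvRot seq) := by
    intro seq acc
    rw [PySem.List.foldl_append_singleton_eq_map
      (f := fun shift => PySem.List.slice seq (some shift) none ++ PySem.List.slice seq none (some shift))]
    congr 1
    simp only [PySem.List.len_eq]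
    rw [PySem.List.pyRange_zero_natCast cyc.length, List.map_map]
    apply List.map_congr_left
    intro k _
    simp only [Function.comp_apply]
    rw [PySem.List.slice_from seq (by positivity), PySem.List.slice_to seq (by positivity)]
    simp [pvRot]
  simp only [List.foldl_cons, List.foldl_nil, key, List.nil_append]

theorem pv_range_succ (n : Nat) :
    List.range (n + 1) = 0 :: (List.range n).map (fun k => k + 1) := by
  rw [List.range_succ_eq_map]

theorem pv_lt_bridge (u v : List Int) : u.lt v ↔ u < v :=
  (List.lt_iff_lex_lt u v).trans List.lex_lt

theorem pv_min?_cons (x : List Int) (t : List (List Int)) :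
    (PySem.List.min? (x :: t) (fun v => v)).getD [] = t.foldl min x := by
  simp only [PySem.List.min?, List.foldl_cons]
  induction t generalizing x with
  | nil => simp
  | cons y t ih =>
    simp only [List.foldl_cons]
    by_cases h : y < x
    · have h' : @LT.lt _ List.instLT y x := (pv_lt_bridge y x).mpr h
      rw [if_pos h', ih y, min_eq_right (le_of_lt h)]
    · have h' : ¬ @LT.lt _ List.instLT y x := fun hc => h ((pv_lt_bridge y x).mp hc)
      rw [if_neg h', ih x, min_eq_left (not_lt.mp h)]

theorem pv_main (cycle : List Int) : canonical_cycle_py cycle = canonical_cycle_py_alt cycle := by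
  unfold canonical_cycle_py canonical_cycle_py_alt
  simp only [List.map_id']
  rcases eq_or_ne cycle [] with h | h
  · subst h; simp
  · have hpos : 0 < cycle.length := List.length_pos_iff.mpr h
    obtain ⟨m, hm⟩ : ∃ m, cycle.length = m + 1 := ⟨cycle.length - 1, by omega⟩
    rw [if_neg (by simp [PySem.List.len_eq, h]), if_neg h]
    rw [pvVariants_eq]
    have hrevne : cycle.reverse ≠ [] := by simpa using h
    have hrevlen : cycle.reverse.length = m + 1 := by simpa using hm
    rw [pvLeastRotation_eq cycle h, pvLeastRotation_eq cycle.reverse hrevne, hrevlen, hm]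
    simp only [Nat.add_sub_cancel]
    rw [pv_range_succ m]
    simp only [List.map_cons, pvRot_zero, List.cons_append, List.map_map]
    rw [pv_min?_cons, List.foldl_append, pv_foldl_min_cons]

-- ===== VERDICT (by name: the statement is the Claim_ definition above) =====
theorem canonical_cycle_py_spec : Claim_equal_canonical_cycle_py := by
  intro cycle _
  unfold Spec_canonical_cycle_py
  exact pv_main cycle
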